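-- pv_equiv track=rewrite | github.com/Ankit-ICY/My-Python-DSA-Problems | DYNAMIC _PROGRAMMING/CheckValidPartition.py | solve
-- ===== SOURCE A (Python) =====
-- def solve(nums,ind,dp,n):
--     if ind>=len(nums):
--         return True
--
--     x = False
--
--     if ind+1<n and nums[ind] == nums[ind+1]:
--         x |=  solve(nums,ind+2,dp,n)
--
--     if ind+2 <n and nums[ind] == nums[ind+1] and nums[ind] ==nums[ind+2]:
--         x |= solve(nums,ind+3,dp,n)
--
--
--     if ind+2<n and (nums[ind+1] - nums[ind]) == 1 and (nums[ind+2]  -nums[ind+1]) == 1: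
--         x |= solve(nums,ind+3,dp,n)
--
--
--     return x
-- ===== SOURCE B (Python) =====
-- def solve(nums, ind, dp, n):
--     L = len(nums)
--     if ind >= L:
--         return True
--     ok = [False] * (L + 3)
--     ok[L] = ok[L + 1] = ok[L + 2] = True
--     for i in range(L - 1, -1, -1):
--         if i + 1 < n and nums[i] == nums[i + 1] and ok[i + 2]:
--             ok[i] = True
--         elif i + 2 < n and nums[i] == nums[i + 1] == nums[i + 2] and ok[i + 3]:
--             ok[i] = True
--         elif i + 2 < n and nums[i + 1] - nums[i] == 1 and nums[i + 2] - nums[i + 1] == 1 and ok[i + 3]: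
--             ok[i] = True
--     return ok[ind]
-- ===== Notes on version B (the rewrite author's own statement) =====
-- stated objective: alternative
-- what changed: Replaced A's branching recursion (exponential on worst-case inputs) by a bottom-up dynamic-programming table filled once from the back of the array, read off at position ind; on inputs where A short-circuits quickly B is not measurably faster.
-- outside the precondition, e.g. on solve([-2], -1, [], 0): A returns False, B returns True; on solve([1, 5], 0, [], 4): A returns False, B raises IndexError
import Mathlib
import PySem

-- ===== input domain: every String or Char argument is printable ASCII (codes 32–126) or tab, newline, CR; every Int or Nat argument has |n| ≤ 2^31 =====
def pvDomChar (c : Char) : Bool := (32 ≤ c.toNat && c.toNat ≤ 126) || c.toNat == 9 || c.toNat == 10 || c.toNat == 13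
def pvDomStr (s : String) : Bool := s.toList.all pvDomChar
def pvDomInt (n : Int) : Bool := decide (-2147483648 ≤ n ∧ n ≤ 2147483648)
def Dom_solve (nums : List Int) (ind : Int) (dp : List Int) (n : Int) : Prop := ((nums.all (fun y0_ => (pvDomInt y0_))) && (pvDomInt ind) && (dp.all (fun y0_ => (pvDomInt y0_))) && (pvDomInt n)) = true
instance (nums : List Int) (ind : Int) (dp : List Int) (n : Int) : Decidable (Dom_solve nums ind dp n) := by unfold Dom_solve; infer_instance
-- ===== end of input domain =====

-- B replaces A's branching recursion by a bottom-up DP table filled once from the back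
-- of the array (objective: alternative). dp is unused by both programs.

-- ===== PORT A =====
-- nums[j]: PySem.List.pyGet? with default 0; Pre_solve guarantees every access is a
-- nonnegative in-range index, where this is exact Python indexing.
def solve (nums : List Int) (ind : Int) (dp : List Int) (n : Int) : Bool :=
  if ind ≥ (nums.length : Int) then true
  else
    let x := false
    let x := if decide (ind + 1 < n) &&
                ((PySem.List.pyGet? nums ind).getD 0 == (PySem.List.pyGet? nums (ind + 1)).getD 0) then
               x || solve nums (ind + 2) dp n else x
    let x := if decide (ind + 2 < n) &&
                ((PySem.List.pyGet? nums ind).getD 0 == (PySem.List.pyGet? nums (ind + 1)).getD 0) &&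
                ((PySem.List.pyGet? nums ind).getD 0 == (PySem.List.pyGet? nums (ind + 2)).getD 0) then
               x || solve nums (ind + 3) dp n else x
    let x := if decide (ind + 2 < n) &&
                ((PySem.List.pyGet? nums (ind + 1)).getD 0 - (PySem.List.pyGet? nums ind).getD 0 == 1) &&
                ((PySem.List.pyGet? nums (ind + 2)).getD 0 - (PySem.List.pyGet? nums (ind + 1)).getD 0 == 1) then
               x || solve nums (ind + 3) dp n else x
    x
termination_by (nums.length - ind).toNat
decreasing_by all_goals omega

-- ===== PORT B =====
-- table for positions (L-k) .. L+2, head = position L-k; entry for position p ≥ L is true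
def solveAltLoop (nums : List Int) (n : Int) : Nat → List Bool
  | 0 => [true, true, true]
  | k + 1 =>
    let prev := solveAltLoop nums n k
    let i : Nat := nums.length - (k + 1)
    let v :=
      if decide ((i : Int) + 1 < n) && (nums.getD i 0 == nums.getD (i + 1) 0) && prev.getD 1 false then true
      else if decide ((i : Int) + 2 < n) && (nums.getD i 0 == nums.getD (i + 1) 0) && (nums.getD i 0 == nums.getD (i + 2) 0) && prev.getD 2 false then true
      else if decide ((i : Int) + 2 < n) && (nums.getD (i + 1) 0 - nums.getD i 0 == 1) && (nums.getD (i + 2) 0 - nums.getD (i + 1) 0 == 1) && prev.getD 2 false then true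
      else false
    v :: prev

def solve_alt (nums : List Int) (ind : Int) (dp : List Int) (n : Int) : Bool :=
  if ind ≥ (nums.length : Int) then true
  else (solveAltLoop nums n nums.length).getD ind.toNat false

-- ===== PRECONDITION & SPEC =====
-- Pre_ excludes negative ind below len(nums) (Python's negative-index wraparound makes A's
-- value accidental and B would wrap its own table) and n > len(nums) with ind < len(nums)
-- (A indexes past the end and raises IndexError on many such inputs; where it happens to
-- return, the value is an artefact of which guard short-circuits, and B raises there).
def Pre_solve (nums : List Int) (ind : Int) (dp : List Int) (n : Int) : Prop :=
  (0 ≤ ind ∧ n ≤ (nums.length : Int)) ∨ (nums.length : Int) ≤ ind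
instance (nums : List Int) (ind : Int) (dp : List Int) (n : Int) : Decidable (Pre_solve nums ind dp n) := by unfold Pre_solve; infer_instance

def pvWitness_solve : List Int × Int × List Int × Int := ([1, 1, 2, 3, 4], 0, [], 5)

def Spec_solve (nums : List Int) (ind : Int) (dp : List Int) (n : Int) (out : Bool) : Prop := out = solve_alt nums ind dp n
instance (nums : List Int) (ind : Int) (dp : List Int) (n : Int) (out : Bool) : Decidable (Spec_solve nums ind dp n out) := by unfold Spec_solve; infer_instance

-- ===== CLAIM (what is proved, stated in full; the proofs are below) =====
def Claim_equal_solve : Prop := ∀ (nums : List Int) (ind : Int) (dp : List Int) (n : Int), Dom_solve nums ind dp n → Pre_solve nums ind dp n → Spec_solve nums ind dp n (solve nums ind dp n)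

-- ===== LEMMAS AND PROOFS =====

lemma g_eq_getD (nums : List Int) (i : Nat) :
    (PySem.List.pyGet? nums (i : Int)).getD 0 = nums.getD i 0 := by
  simp [PySem.List.pyGet?_natCast, List.getD]

lemma solveAltLoop_succ (nums : List Int) (n : Int) (k : Nat) :
    solveAltLoop nums n (k + 1) =
      (if decide (((nums.length - (k+1) : Nat) : Int) + 1 < n) && (nums.getD (nums.length - (k+1)) 0 == nums.getD (nums.length - (k+1) + 1) 0) && (solveAltLoop nums n k).getD 1 false then true
       else if decide (((nums.length - (k+1) : Nat) : Int) + 2 < n) && (nums.getD (nums.length - (k+1)) 0 == nums.getD (nums.length - (k+1) + 1) 0) && (nums.getD (nums.length - (k+1)) 0 == nums.getD (nums.length - (k+1) + 2) 0) && (solveAltLoop nums n k).getD 2 false then true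
       else if decide (((nums.length - (k+1) : Nat) : Int) + 2 < n) && (nums.getD (nums.length - (k+1) + 1) 0 - nums.getD (nums.length - (k+1)) 0 == 1) && (nums.getD (nums.length - (k+1) + 2) 0 - nums.getD (nums.length - (k+1) + 1) 0 == 1) && (solveAltLoop nums n k).getD 2 false then true
       else false) :: solveAltLoop nums n k := rfl

set_option maxHeartbeats 1000000 in
lemma table_spec (nums : List Int) (dp : List Int) (n : Int) :
    ∀ k, k ≤ nums.length → ∀ j, j < k + 3 →
      (solveAltLoop nums n k).getD j false
        = solve nums ((nums.length - k + j : Nat) : Int) dp n := by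
  intro k
  induction k with
  | zero =>
    intro _ j hj
    rw [solve, if_pos (show ((nums.length - 0 + j : Nat) : Int) ≥ (nums.length : Int) by omega)]
    interval_cases j <;> rfl
  | succ k ih =>
    intro hk j hj
    have hk' : k ≤ nums.length := by omega
    match j with
    | Nat.succ j' =>
      have : (solveAltLoop nums n (k+1)).getD (j'+1) false
           = (solveAltLoop nums n k).getD j' false := by
        simp [solveAltLoop]
      rw [this, ih hk' j' (by omega)]
      congr 1
      omega
    | 0 =>
      -- head entry: position i = L - (k+1) < L
      have h2 : (solveAltLoop nums n k).getD 1 false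
          = solve nums (((nums.length - (k+1) : Nat) : Int) + 2) dp n := by
        rw [ih hk' 1 (by omega)]
        congr 1
        omega
      have h3 : (solveAltLoop nums n k).getD 2 false
          = solve nums (((nums.length - (k+1) : Nat) : Int) + 3) dp n := by
        rw [ih hk' 2 (by omega)]
        congr 1
        omega
      have hnotbase : ¬ (((nums.length - (k+1) : Nat) : Int) ≥ (nums.length : Int)) := by omega
      have hcast : ((nums.length - (k + 1) + 0 : Nat) : Int) = ((nums.length - (k+1) : Nat) : Int) := by omega
      have g0 : (PySem.List.pyGet? nums ((nums.length - (k+1) : Nat) : Int)).getD 0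
          = nums.getD (nums.length - (k+1)) 0 := g_eq_getD nums (nums.length - (k+1))
      have g1 : (PySem.List.pyGet? nums (((nums.length - (k+1) : Nat) : Int) + 1)).getD 0
          = nums.getD (nums.length - (k+1) + 1) 0 := by
        rw [show (((nums.length - (k+1) : Nat) : Int) + 1) = ((nums.length - (k+1) + 1 : Nat) : Int) by omega]
        exact g_eq_getD nums (nums.length - (k+1) + 1)
      have g2 : (PySem.List.pyGet? nums (((nums.length - (k+1) : Nat) : Int) + 2)).getD 0
          = nums.getD (nums.length - (k+1) + 2) 0 := by
        rw [show (((nums.length - (k+1) : Nat) : Int) + 2) = ((nums.length - (k+1) + 2 : Nat) : Int) by omega]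
        exact g_eq_getD nums (nums.length - (k+1) + 2)
      rw [hcast]
      conv_rhs => rw [solve]
      rw [if_neg hnotbase]
      rw [g0, g1, g2, ← h2, ← h3]
      rw [solveAltLoop_succ, List.getD_cons_zero]
      clear ih h2 h3 g0 g1 g2 hnotbase hcast hk hk' hj
      split_ifs <;> simp_all <;> omega

theorem solve_spec : Claim_equal_solve := by
  intro nums ind dp n _ hpre
  unfold Spec_solve solve_alt
  by_cases hbig : ind ≥ (nums.length : Int)
  · rw [if_pos hbig, solve]
    simp [hbig]
  · rw [if_neg hbig]
    rcases hpre with ⟨h0, hn⟩ | h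
    · have hlt : ind.toNat < nums.length := by omega
      rw [table_spec nums dp n nums.length (le_refl _) ind.toNat
            (by omega)]
      congr 1
      omega
    · exact absurd h (by omega)
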